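-- pv_equiv track=rewrite | github.com/JoinMarket-Org/joinmarket-clientserver | jmclient/jmclient/support.py | select_greediest
-- ===== SOURCE A (Python) =====
-- from functools import reduce
--
-- class NotEnoughFundsException(RuntimeError):
--
--     def __init__(self, want, has):
--         super().__init__("Not enough funds, " +
--             str(want) + " vs. " + str(has) + ".")
--
-- def select_greediest(unspent, value):
--     """
--     UTXO selection algorithm for speediest dust reduction
--     Combines the shortest run of utxos (sorted by size, from smallest) which
--     exceeds the target value; if the target value is larger than the sum of
--     all smaller utxos, uses the smallest utxo larger than the target value.
--     """
--     value, key = int(value), lambda u: u["value"]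
--     high = sorted([u for u in unspent if key(u) >= value], key=key)
--     low = sorted([u for u in unspent if key(u) < value], key=key)
--     lowsum = reduce(lambda x, y: x + y, map(key, low), 0)
--     if value > lowsum:
--         if len(high) == 0:
--             raise NotEnoughFundsException(value, lowsum)
--         else:
--             return [high[0]]
--     else:
--         end, total = 0, 0
--         while total < value:
--             total += low[end]['value']
--             end += 1
--         return low[0:end]
-- ===== SOURCE B (Python) =====
-- class NotEnoughFundsException(RuntimeError):
--
--     def __init__(self, want, has):
--         super().__init__("Not enough funds, " +
--             str(want) + " vs. " + str(has) + ".")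
--
-- def select_greediest(unspent, value):
--     """One sort of the whole list and a single accumulating scan: collect
--     small utxos until the target is met; if a utxo >= target is reached
--     first, it is the smallest sufficient one, so return just it."""
--     value = int(value)
--     run, total = [], 0
--     for u in sorted(unspent, key=lambda x: x["value"]):
--         if total >= value:
--             return run
--         if u["value"] >= value:
--             return [u]
--         run.append(u)
--         total += u["value"]
--     if total >= value:
--         return run
--     raise NotEnoughFundsException(value, total)
-- ===== Notes on version B (the rewrite author's own statement) =====
-- stated objective: simpler
-- what changed: Replaces the high/low partition, two sorts, reduce-based lowsum and indexed while loop by one sort of the whole list and a single accumulating scan that returns the collected run once the target is met, returns the first utxo >= target as the fallback, or raises at the end.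
-- outside the precondition, e.g. on select_greediest([{'value': -5}, {'value': 0}], -1): A returns [{'value': 0}], B returns []
import Mathlib
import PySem

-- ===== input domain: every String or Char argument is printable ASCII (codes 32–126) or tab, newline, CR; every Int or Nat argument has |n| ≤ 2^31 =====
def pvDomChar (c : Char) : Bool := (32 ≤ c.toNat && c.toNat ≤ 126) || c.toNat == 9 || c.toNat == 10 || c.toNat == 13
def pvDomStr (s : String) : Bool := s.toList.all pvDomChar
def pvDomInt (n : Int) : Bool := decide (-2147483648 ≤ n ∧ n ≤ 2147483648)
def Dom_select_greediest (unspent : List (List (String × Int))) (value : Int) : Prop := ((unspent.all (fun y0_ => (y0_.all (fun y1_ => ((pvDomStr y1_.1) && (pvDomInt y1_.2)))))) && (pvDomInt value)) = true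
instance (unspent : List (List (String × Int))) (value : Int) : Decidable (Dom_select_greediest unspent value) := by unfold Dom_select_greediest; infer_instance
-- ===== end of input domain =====

-- B replaces A's high/low partition, two sorts, reduce-based lowsum and indexed while loop by
-- one sort of the whole list and a single accumulating scan (objective: simpler decomposition).
-- Return-value equivalence only; neither program mutates its input.

-- ===== PORT A =====
-- u["value"]: first-match lookup in the association list; exact when the key is present (Pre_)
def pvKey (u : List (String × Int)) : Int := (u.lookup "value").getD 0

-- the while loop: end, total = 0, 0; while total < value: total += low[end]['value']; end += 1
-- (on exhaustion Python would raise IndexError; under the guard value ≤ lowsum the loop stops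
-- at the latest when the whole list is consumed, so exhaustion returns the full length)
def pvLoopA (value : Int) : List (List (String × Int)) → Int → Nat → Nat
  | [], _, e => e
  | u :: rs, total, e =>
      if total < value then pvLoopA value rs (total + pvKey u) (e + 1) else e

def select_greediest (unspent : List (List (String × Int))) (value : Int) : List (List (String × Int)) :=
  let high := PySem.List.sorted (unspent.filter (fun u => decide (pvKey u ≥ value))) pvKey
  let low := PySem.List.sorted (unspent.filter (fun u => decide (pvKey u < value))) pvKey
  let lowsum := (low.map pvKey).foldl (· + ·) 0
  if lowsum < value then
    match high with
    | [] => []                -- raise NotEnoughFundsException: excluded by Pre_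
    | h :: _ => [h]
  else
    PySem.List.slice low (some 0) (some (pvLoopA value low 0 0 : Int))

-- ===== PORT B =====
-- the for loop over the sorted list, with run/total as the accumulators
def pvLoopB (value : Int) : List (List (String × Int)) → List (List (String × Int)) → Int → List (List (String × Int))
  | [], run, total => if value ≤ total then run else []   -- raise NotEnoughFundsException: excluded by Pre_
  | u :: rs, run, total =>
      if value ≤ total then run
      else if value ≤ pvKey u then [u]
      else pvLoopB value rs (run ++ [u]) (total + pvKey u)

def select_greediest_alt (unspent : List (List (String × Int))) (value : Int) : List (List (String × Int)) :=
  pvLoopB value (PySem.List.sorted unspent pvKey) [] 0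

-- ===== PRECONDITION & SPEC =====
-- Pre_ excludes (i) utxo dicts without the "value" key (KeyError in both programs), (ii) the
-- not-enough-funds case, where both programs raise NotEnoughFundsException, and (iii) the
-- degenerate corner of a nonpositive target exceeding the sum of the smaller utxos, where the
-- empty run already meets the target and A's smallest-sufficient-utxo answer and B's empty run
-- are equally defensible (nobody specifies a utxo selection for a target ≤ 0).
def Pre_select_greediest (unspent : List (List (String × Int))) (value : Int) : Prop :=
  (unspent.all (fun u => (u.lookup "value").isSome) = true) ∧
  (((unspent.filter (fun u => decide (pvKey u < value))).map pvKey).sum < value →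
    unspent.any (fun u => decide (pvKey u ≥ value)) = true) ∧
  ¬ (value ≤ 0 ∧ ((unspent.filter (fun u => decide (pvKey u < value))).map pvKey).sum < value)
instance (unspent : List (List (String × Int))) (value : Int) : Decidable (Pre_select_greediest unspent value) := by unfold Pre_select_greediest; infer_instance

def pvWitness_select_greediest : (List (List (String × Int))) × Int :=
  ([[("value", 1)], [("value", 2)], [("value", 7)]], 3)

def Spec_select_greediest (unspent : List (List (String × Int))) (value : Int) (out : List (List (String × Int))) : Prop := out = select_greediest_alt unspent value
instance (unspent : List (List (String × Int))) (value : Int) (out : List (List (String × Int))) : Decidable (Spec_select_greediest unspent value out) := by unfold Spec_select_greediest; infer_instance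

-- ===== CLAIM (what is proved, stated in full; the proofs are below) =====
def Claim_equal_select_greediest : Prop := ∀ (unspent : List (List (String × Int))) (value : Int), Dom_select_greediest unspent value → Pre_select_greediest unspent value → Spec_select_greediest unspent value (select_greediest unspent value)

-- ===== LEMMAS AND PROOFS =====

-- insertion steps over a low ++ high split
theorem pv_insertBy_append_left {α : Type} (before : α → α → Bool) (x : α)
    (A B : List α) (h : ∀ b ∈ B, before x b = true) :
    PySem.List.insertBy before x (A ++ B) = PySem.List.insertBy before x A ++ B := by
  induction A with
  | nil =>
      cases B with
      | nil => simp [PySem.List.insertBy]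
      | cons b t => simp [PySem.List.insertBy, h b (by simp)]
  | cons a A' ih =>
      by_cases hx : before x a
      · simp [PySem.List.insertBy, hx]
      · simp [PySem.List.insertBy, hx, ih]

theorem pv_insertBy_append_right {α : Type} (before : α → α → Bool) (x : α)
    (A B : List α) (h : ∀ a ∈ A, before x a = false) :
    PySem.List.insertBy before x (A ++ B) = A ++ PySem.List.insertBy before x B := by
  induction A with
  | nil => simp
  | cons a A' ih =>
      simp only [List.cons_append, PySem.List.insertBy, h a (by simp)]
      simp only [Bool.false_eq_true, if_false, List.cons.injEq, true_and]
      exact ih (fun a ha => h a (by simp [ha]))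

-- the stable sort of the whole list is sorted(low) ++ sorted(high)
theorem pv_sorted_split (value : Int) (xs : List (List (String × Int))) :
    PySem.List.sorted xs pvKey =
      PySem.List.sorted (xs.filter (fun u => decide (pvKey u < value))) pvKey ++
      PySem.List.sorted (xs.filter (fun u => decide (pvKey u ≥ value))) pvKey := by
  induction xs using List.reverseRecOn with
  | nil => simp [PySem.List.sorted_eq_foldl_insertBy]
  | append_singleton t x ih =>
      rw [PySem.List.sorted_eq_foldl_insertBy, List.foldl_append, List.foldl_cons, List.foldl_nil,
          ← PySem.List.sorted_eq_foldl_insertBy, ih, List.filter_append, List.filter_append]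
      by_cases hx : pvKey x < value
      · rw [pv_insertBy_append_left _ x _ _ (by
          intro b hb
          have hbv := List.of_mem_filter ((PySem.List.mem_sorted _ _ _ _).mp hb)
          simp at hbv ⊢
          omega)]
        simp [hx, not_le.mpr hx,
          PySem.List.sorted_eq_foldl_insertBy, List.foldl_append]
      · rw [pv_insertBy_append_right _ x _ _ (by
          intro a ha
          have hav := List.of_mem_filter ((PySem.List.mem_sorted _ _ _ _).mp ha)
          simp at hav ⊢
          omega)]
        simp [hx, not_lt.mp hx,
          PySem.List.sorted_eq_foldl_insertBy, List.foldl_append]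

-- offset of A's loop counter
theorem pv_loopA_shift (value : Int) (L : List (List (String × Int))) :
    ∀ (total : Int) (e : Nat), pvLoopA value L total e = e + pvLoopA value L total 0 := by
  induction L with
  | nil => intro total e; simp [pvLoopA]
  | cons u rs ih =>
      intro total e
      by_cases h : total < value
      · simp only [pvLoopA, if_pos h]
        rw [ih (total + pvKey u) (e + 1), ih (total + pvKey u) 1]
        omega
      · simp [pvLoopA, h]

-- when the lows suffice, B's scan returns the prefix A's while loop selects
theorem pv_loopB_take (value : Int) (H : List (List (String × Int)))
    (L : List (List (String × Int))) :
    ∀ (run : List (List (String × Int))) (total : Int),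
      value ≤ total + (L.map pvKey).sum → (∀ u ∈ L, pvKey u < value) →
      pvLoopB value (L ++ H) run total = run ++ L.take (pvLoopA value L total 0) := by
  induction L with
  | nil =>
      intro run total hsum _
      simp only [List.map_nil, List.sum_nil, add_zero] at hsum
      cases H with
      | nil => simp [pvLoopB, pvLoopA, hsum]
      | cons h t => simp [pvLoopB, pvLoopA, hsum]
  | cons u rs ih =>
      intro run total hsum hlow
      by_cases ht : value ≤ total
      · have : ¬ total < value := not_lt.mpr ht
        simp [pvLoopB, pvLoopA, ht, this]
      · have htot : total < value := not_le.mp ht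
        have hu : ¬ value ≤ pvKey u := not_le.mpr (hlow u (by simp))
        simp only [List.cons_append, pvLoopB, if_neg ht, if_neg hu]
        rw [ih (run ++ [u]) (total + pvKey u)
              (by simp at hsum ⊢; omega) (fun v hv => hlow v (by simp [hv]))]
        simp only [pvLoopA, if_pos htot]
        rw [pv_loopA_shift value rs (total + pvKey u) 1, Nat.add_comm 1]
        simp [List.take_succ_cons]

-- when even all the lows do not reach the target, B's scan runs through them and
-- answers from the first high element (the running total never reaches the target
-- because the lows are scanned in ascending order)
theorem pv_loopB_high (value : Int) (H : List (List (String × Int)))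
    (hH : ∀ h ∈ H, value ≤ pvKey h) :
    ∀ (L : List (List (String × Int))) (run : List (List (String × Int))) (total : Int),
      L.Pairwise (fun a b => pvKey a ≤ pvKey b) → (∀ u ∈ L, pvKey u < value) →
      total < value → total + (L.map pvKey).sum < value →
      pvLoopB value (L ++ H) run total = H.take 1 := by
  intro L
  induction L with
  | nil =>
      intro run total _ _ htot _
      cases H with
      | nil => simp [pvLoopB, not_le.mpr htot]
      | cons h t => simp [pvLoopB, not_le.mpr htot, hH h (by simp)]
  | cons u rs ih =>
      intro run total hpw hlow htot hsum
      have hu : ¬ value ≤ pvKey u := not_le.mpr (hlow u (by simp))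
      simp only [List.cons_append, pvLoopB, if_neg (not_le.mpr htot), if_neg hu]
      have hpw' := (List.pairwise_cons.mp hpw)
      have hsum' : (total + pvKey u) + (rs.map pvKey).sum < value := by
        simp at hsum ⊢; omega
      have htot' : total + pvKey u < value := by
        by_cases hk : pvKey u ≤ 0
        · omega
        · have : 0 ≤ (rs.map pvKey).sum := by
            apply List.sum_nonneg
            intro x hx
            obtain ⟨v, hv, rfl⟩ := List.mem_map.mp hx
            have := hpw'.1 v hv
            omega
          omega
      exact ih (run ++ [u]) (total + pvKey u) hpw'.2 (fun v hv => hlow v (by simp [hv])) htot' hsum'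

-- ===== VERDICT (by name: the statement is the Claim_ definition above) =====
theorem select_greediest_spec : Claim_equal_select_greediest := by
  intro unspent value _ hpre
  obtain ⟨_, hfunds, hcorner⟩ := hpre
  unfold Spec_select_greediest select_greediest select_greediest_alt
  rw [pv_sorted_split value unspent]
  set lowf := unspent.filter (fun u => decide (pvKey u < value)) with hlowf
  set low := PySem.List.sorted lowf pvKey with hlow
  set high := PySem.List.sorted (unspent.filter (fun u => decide (pvKey u ≥ value))) pvKey with hhigh
  have hsum : (low.map pvKey).foldl (· + ·) 0 = (lowf.map pvKey).sum := by
    rw [← List.sum_eq_foldl]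
    exact List.Perm.sum_eq (List.Perm.map pvKey (PySem.List.sorted_perm lowf pvKey false))
  have hlowmem : ∀ u ∈ low, pvKey u < value := by
    intro u hu
    have := List.of_mem_filter ((PySem.List.mem_sorted _ _ _ _).mp hu)
    simpa using this
  have hlowsum : (low.map pvKey).sum = (lowf.map pvKey).sum := by
    exact List.Perm.sum_eq (List.Perm.map pvKey (PySem.List.sorted_perm lowf pvKey false))
  simp only [hsum]
  by_cases hc : (lowf.map pvKey).sum < value
  · rw [if_pos hc]
    have hpos : 0 < value := by omega
    have hH : ∀ h ∈ high, value ≤ pvKey h := by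
      intro h hh
      have := List.of_mem_filter ((PySem.List.mem_sorted _ _ _ _).mp hh)
      simpa using this
    rw [pv_loopB_high value high hH low []
        0 (PySem.List.sorted_pairwise lowf pvKey) hlowmem hpos (by simpa [hlowsum] using hc)]
    cases high <;> simp
  · rw [if_neg hc]
    rw [pv_loopB_take value high low [] 0 (by simp [hlowsum]; omega) hlowmem]
    simp only [List.nil_append, PySem.List.slice_zero_start]
    rw [PySem.List.slice_to_natCast]
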